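-- pv_equiv track=rewrite | github.com/tuhh-softsec/code2DFD | technology_specific_extractors/maven/mvn_entry.py | in_plugin
-- ===== SOURCE A (Python) =====
-- def in_plugin(file: list, line_nr: str) -> bool:
--     """Checks if provided line is inside a <plugin> </plugin> block in the pom.xml .
--     """
--
--     count = line_nr
--     while count >= 0:
--         if "<plugin>" in file[count] and "</plugin>" in file[count]:
--             return False
--         if "<plugin>" in file[count]:
--             return True
--         if "</plugin>" in file[count]:
--             return False
--         count -= 1
--     return False
-- ===== SOURCE B (Python) =====
-- def in_plugin(file: list, line_nr: str) -> bool: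
--     # Forward single pass: the last matching line before line_nr decides,
--     # which equals A's first matching line scanning backwards.
--     result = False
--     for i in range(0, line_nr + 1):
--         line = file[i]
--         if "<plugin>" in line and "</plugin>" in line:
--             result = False
--         elif "<plugin>" in line:
--             result = True
--         elif "</plugin>" in line:
--             result = False
--     return result
-- ===== Notes on version B (the rewrite author's own statement) =====
-- stated objective: alternative
-- what changed: Backward scan with early return replaced by a forward fold over range(0, line_nr+1) that keeps the decision of the last tagged line seen; no early exit, opposite traversal direction.
import Mathlib
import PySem

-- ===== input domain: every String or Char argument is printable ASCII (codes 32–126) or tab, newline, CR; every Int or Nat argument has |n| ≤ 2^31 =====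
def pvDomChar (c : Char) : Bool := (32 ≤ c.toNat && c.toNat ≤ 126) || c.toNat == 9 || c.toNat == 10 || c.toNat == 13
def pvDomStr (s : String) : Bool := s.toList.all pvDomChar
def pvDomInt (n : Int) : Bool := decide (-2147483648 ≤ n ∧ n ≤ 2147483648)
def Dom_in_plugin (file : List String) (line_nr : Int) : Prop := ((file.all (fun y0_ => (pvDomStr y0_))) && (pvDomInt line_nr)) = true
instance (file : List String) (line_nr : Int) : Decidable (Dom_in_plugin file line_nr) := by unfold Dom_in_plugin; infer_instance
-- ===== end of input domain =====

-- B replaces A's backward scan with early return by a forward fold keeping the last tagged line's decision (alternative decomposition, same cost).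


-- ===== PORT A =====
-- while count >= 0: check tags at file[count], else count -= 1  (backward scan, early return)
def inPluginLoop (file : List String) (count : Int) : Bool :=
  if h : 0 ≤ count then
    let line := PySem.List.pyGetD file count ""
    if PySem.Str.isIn "<plugin>" line && PySem.Str.isIn "</plugin>" line then false
    else if PySem.Str.isIn "<plugin>" line then true
    else if PySem.Str.isIn "</plugin>" line then false
    else inPluginLoop file (count - 1)
  else false
termination_by (count + 1).toNat
decreasing_by omega

def in_plugin (file : List String) (line_nr : Int) : Bool := inPluginLoop file line_nr

-- ===== PORT B =====
-- loop body of Source B: update the running result according to the tags on one line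
def pluginStep (res : Bool) (line : String) : Bool :=
  if PySem.Str.isIn "<plugin>" line && PySem.Str.isIn "</plugin>" line then false
  else if PySem.Str.isIn "<plugin>" line then true
  else if PySem.Str.isIn "</plugin>" line then false
  else res

def in_plugin_alt (file : List String) (line_nr : Int) : Bool :=
  (PySem.List.pyRange 0 (line_nr + 1) 1).foldl
    (fun res i => pluginStep res (PySem.List.pyGetD file i "")) false

-- ===== PRECONDITION & SPEC =====
-- Python A raises IndexError iff 0 ≤ line_nr and line_nr ≥ len(file); Pre_ excludes exactly those inputs (B raises there too).
def Pre_in_plugin (file : List String) (line_nr : Int) : Prop := line_nr < (file.length : Int)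
instance (file : List String) (line_nr : Int) : Decidable (Pre_in_plugin file line_nr) := by unfold Pre_in_plugin; infer_instance
def pvWitness_in_plugin : List String × Int := (["<build>", "<plugin>", "<x>"], 2)

def Spec_in_plugin (file : List String) (line_nr : Int) (out : Bool) : Prop := out = in_plugin_alt file line_nr
instance (file : List String) (line_nr : Int) (out : Bool) : Decidable (Spec_in_plugin file line_nr out) := by unfold Spec_in_plugin; infer_instance

-- ===== CLAIM (what is proved, stated in full; the proofs are below) =====
def Claim_equal_in_plugin : Prop := ∀ (file : List String) (line_nr : Int), Dom_in_plugin file line_nr → Pre_in_plugin file line_nr → Spec_in_plugin file line_nr (in_plugin file line_nr)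

-- ===== LEMMAS AND PROOFS =====

lemma inPluginLoop_neg (file : List String) (c : Int) (h : c < 0) :
    inPluginLoop file c = false := by
  rw [inPluginLoop]; simp [not_le.mpr h]

lemma inPluginLoop_step (file : List String) (c : Int) (h : 0 ≤ c) :
    inPluginLoop file c = pluginStep (inPluginLoop file (c - 1)) (PySem.List.pyGetD file c "") := by
  rw [inPluginLoop]
  simp only [h, dite_true, pluginStep]

lemma loop_eq_fold (file : List String) (n : Nat) :
    inPluginLoop file (n : Int) = in_plugin_alt file (n : Int) := by
  induction n with
  | zero =>
    rw [show ((0:Nat):Int) = 0 from rfl,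
        inPluginLoop_step file 0 le_rfl, inPluginLoop_neg file (0 - 1) (by omega)]
    unfold in_plugin_alt
    rw [PySem.List.pyRange_one_singleton]
    rfl
  | succ n ih =>
    rw [inPluginLoop_step file ((n + 1 : Nat) : Int) (by omega)]
    unfold in_plugin_alt
    rw [show (((n + 1 : Nat) : Int) + 1) = ((n : Int) + 1) + 1 by push_cast; ring,
        PySem.List.pyRange_one_succ_right (show (0:Int) ≤ (n : Int) + 1 by omega),
        List.foldl_append]
    unfold in_plugin_alt at ih
    rw [← ih]
    simp only [List.foldl_cons, List.foldl_nil]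
    congr 2
    omega

-- ===== VERDICT (by name: the statement is the Claim_ definition above) =====
theorem in_plugin_spec : Claim_equal_in_plugin := by
  intro file line_nr _ _
  unfold Spec_in_plugin in_plugin
  by_cases h : 0 ≤ line_nr
  · lift line_nr to ℕ using h
    exact loop_eq_fold file line_nr
  · rw [inPluginLoop_neg file line_nr (by omega)]
    unfold in_plugin_alt
    rw [PySem.List.pyRange_one_eq_nil (by omega)]
    rfl
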